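/- GENERATED by tools/mkclosed.py from the statements of the toy program (Toy/Spec/Units/*.lean) — do not edit; re-run it when a statement changes.
   THE BOTTOM-UP COMPOSITION: every unit's contract with no hypothesis about a callee left, from the unit theorems, in a
   topological order of the hypotheses (8 units, 8 functions). -/
import ProgX.Base.Closed
import Toy.Spec.Units.asan_register_globals
import Toy.Spec.Units.clamp_length
import Toy.Spec.Units.fill_buffer
import Toy.Spec.Units.store_sum
import Toy.Spec.Units.sub_I_65535_1
import Toy.Spec.Units.weighted_sum
import Toy.Spec.Units.prog_main
import Toy.Spec.Units.run_ctors
namespace Toy.Closed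
open X86 X86.User Asan

/-- **The bytes of every function are in the reference state**: the `_hcode` hypothesis of its units. -/
structure AllCode (Lay : Layout) (u₀ : State) : Prop where
  /-- the bytes of `__asan_register_globals` -/
  asan_register_globals : HasCodeNat Lay u₀ ProgX.Base.L.__asan_register_globals.entry ProgX.Base.Code.code___asan_register_globals.nat ProgX.Base.L.__asan_register_globals.size
  /-- the bytes of `clamp_length` -/
  clamp_length : HasCodeNat Lay u₀ Toy.L.clamp_length.entry Toy.Code.code_clamp_length.nat Toy.L.clamp_length.size
  /-- the bytes of `fill_buffer` -/
  fill_buffer : HasCodeNat Lay u₀ Toy.L.fill_buffer.entry Toy.Code.code_fill_buffer.nat Toy.L.fill_buffer.size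
  /-- the bytes of `store_sum` -/
  store_sum : HasCodeNat Lay u₀ Toy.L.store_sum.entry Toy.Code.code_store_sum.nat Toy.L.store_sum.size
  /-- the bytes of `_sub_I_65535_1` -/
  sub_I_65535_1 : HasCodeNat Lay u₀ Toy.L._sub_I_65535_1.entry Toy.Code.code__sub_I_65535_1.nat Toy.L._sub_I_65535_1.size
  /-- the bytes of `weighted_sum` -/
  weighted_sum : HasCodeNat Lay u₀ Toy.L.weighted_sum.entry Toy.Code.code_weighted_sum.nat Toy.L.weighted_sum.size
  /-- the bytes of `prog_main` -/
  prog_main : HasCodeNat Lay u₀ Toy.L.prog_main.entry Toy.Code.code_prog_main.nat Toy.L.prog_main.size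
  /-- the bytes of `run_ctors` -/
  run_ctors : HasCodeNat Lay u₀ ProgX.Base.L.run_ctors.entry ProgX.Base.Code.code_run_ctors.nat ProgX.Base.L.run_ctors.size

/-- **The contract of every unit, with no hypothesis about a callee left.** -/
structure Contracts (Lay : Layout) (μ : Microarch) (u₀ : State) : Prop where
  /-- unit `asan_register_globals` -/
  asan_register_globals : Calls Lay μ ProgX.Base.WayInv (ProgX.Base.conv u₀) ProgX.Base.L.__asan_register_globals.entry (Asan.registerGlobalsSpec Toy.Spec.rt)
  /-- unit `clamp_length` -/
  clamp_length : ∀ (others : List Obj) (frames : List (Nat × FrameLayout)), Calls Lay μ ProgX.Base.WayInv (ProgX.Base.conv u₀) Toy.L.clamp_length.entry (Toy.Spec.clamp_length.spec others frames)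
  /-- unit `fill_buffer` -/
  fill_buffer : ∀ (others : List Obj) (frames : List (Nat × FrameLayout)), Calls Lay μ ProgX.Base.WayInv (ProgX.Base.conv u₀) Toy.L.fill_buffer.entry (Toy.Spec.fill_buffer.spec others frames)
  /-- unit `store_sum` -/
  store_sum : ∀ (others : List Obj) (frames : List (Nat × FrameLayout)), Calls Lay μ ProgX.Base.WayInv (ProgX.Base.conv u₀) Toy.L.store_sum.entry (Toy.Spec.store_sum.spec others frames)
  /-- unit `sub_I_65535_1` -/
  sub_I_65535_1 : Calls Lay μ ProgX.Base.WayInv (ProgX.Base.conv u₀) Toy.L._sub_I_65535_1.entry (Asan.ctorSpec Toy.Spec.rt)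
  /-- unit `weighted_sum` -/
  weighted_sum : ∀ (others : List Obj) (frames : List (Nat × FrameLayout)), Calls Lay μ ProgX.Base.WayInv (ProgX.Base.conv u₀) Toy.L.weighted_sum.entry (Toy.Spec.weighted_sum.spec others frames)
  /-- unit `prog_main` -/
  prog_main : ∀ (others : List Obj) (frames : List (Nat × FrameLayout)), Calls Lay μ ProgX.Base.WayInv (ProgX.Base.conv u₀) Toy.L.prog_main.entry (Toy.Spec.prog_main.spec others frames)
  /-- unit `run_ctors` -/
  run_ctors : Calls Lay μ ProgX.Base.WayInv (ProgX.Base.conv u₀) ProgX.Base.L.run_ctors.entry (Asan.runCtorsSpec Toy.Spec.rt)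

end Toy.Closed
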